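-- pv_equiv track=rewrite | github.com/mikepqr/adventofcode | 2022/14/sand.py | stringify_points
-- ===== SOURCE A (Python) =====
-- def stringify_points(points: set[tuple[int, int]], fill="#", empty=".") -> str:
--     xmin = min(points, key=lambda x: x[0])[0]
--     xmax = max(points, key=lambda x: x[0])[0]
--     ymin = min(points, key=lambda x: x[1])[1]
--     ymax = max(points, key=lambda x: x[1])[1]
--     return "\n".join(
--         "".join(fill if (x, y) in points else empty for x in range(xmin, xmax + 1))
--         for y in range(ymin, ymax + 1)
--     )
-- ===== SOURCE B (Python) =====
-- def stringify_points(points: set[tuple[int, int]], fill="#", empty=".") -> str: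
--     xmin = min(p[0] for p in points)
--     xmax = max(p[0] for p in points)
--     ymin = min(p[1] for p in points)
--     ymax = max(p[1] for p in points)
--     grid = [[empty] * (xmax - xmin + 1) for _ in range(ymax - ymin + 1)]
--     for x, y in points:
--         grid[y - ymin][x - xmin] = fill
--     return "\n".join("".join(row) for row in grid)
-- ===== Notes on version B (the rewrite author's own statement) =====
-- stated objective: alternative
-- what changed: B scatters the points once into a materialized 2D grid of `empty` cells (grid[y-ymin][x-xmin] = fill) and joins the rows, instead of A's per-cell membership test over every (x,y) of the bounding box.
import Mathlib
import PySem

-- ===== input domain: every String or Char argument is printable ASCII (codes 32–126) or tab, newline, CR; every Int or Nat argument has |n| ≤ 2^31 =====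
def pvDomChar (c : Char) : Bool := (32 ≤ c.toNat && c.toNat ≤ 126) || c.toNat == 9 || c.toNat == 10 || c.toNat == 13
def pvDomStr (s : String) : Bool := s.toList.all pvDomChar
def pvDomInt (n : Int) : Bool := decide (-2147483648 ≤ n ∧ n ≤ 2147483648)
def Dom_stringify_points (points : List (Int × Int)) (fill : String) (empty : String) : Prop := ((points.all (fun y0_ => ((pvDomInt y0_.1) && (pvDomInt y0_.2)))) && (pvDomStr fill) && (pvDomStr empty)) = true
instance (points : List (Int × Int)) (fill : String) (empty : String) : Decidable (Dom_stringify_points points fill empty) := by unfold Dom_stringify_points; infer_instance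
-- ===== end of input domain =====

-- B renders the point set by scattering each point once into a materialized grid of `empty`
-- cells instead of testing membership for every cell of the bounding box (alternative algorithm).

-- ===== PORT A =====
def stringify_points (points : List (Int × Int)) (fill : String) (empty : String) : String :=
  match PySem.List.min? points (fun p => p.1), PySem.List.max? points (fun p => p.1),
        PySem.List.min? points (fun p => p.2), PySem.List.max? points (fun p => p.2) with
  | some mx, some Mx, some my, some My =>
    let xmin := mx.1
    let xmax := Mx.1
    let ymin := my.2
    let ymax := My.2
    PySem.Str.join "\n" ((PySem.List.pyRange ymin (ymax + 1) 1).map (fun y =>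
      PySem.Str.join "" ((PySem.List.pyRange xmin (xmax + 1) 1).map (fun x =>
        if (x, y) ∈ points then fill else empty))))
  | _, _, _, _ => ""  -- Python raises ValueError on an empty set; excluded by Pre_

-- ===== PORT B =====
def stringify_points_alt (points : List (Int × Int)) (fill : String) (empty : String) : String :=
  match PySem.List.min? (points.map (fun p => p.1)) (fun v => v) with
  | none => ""  -- Python raises ValueError on an empty set; excluded by Pre_
  | some xmin =>
    match PySem.List.max? (points.map (fun p => p.1)) (fun v => v) with
    | none => ""
    | some xmax =>
      match PySem.List.min? (points.map (fun p => p.2)) (fun v => v) with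
      | none => ""
      | some ymin =>
        match PySem.List.max? (points.map (fun p => p.2)) (fun v => v) with
        | none => ""
        | some ymax =>
          let grid0 : List (List String) :=
            List.replicate (ymax - ymin + 1).toNat (List.replicate (xmax - xmin + 1).toNat empty)
          let grid := points.foldl (fun g p =>
            g.set (p.2 - ymin).toNat (((g.getD (p.2 - ymin).toNat []).set (p.1 - xmin).toNat fill))) grid0
          PySem.Str.join "\n" (grid.map (fun row => PySem.Str.join "" row))

-- ===== PRECONDITION & SPEC =====
-- Pre_ excludes only the empty set, on which A's min() raises ValueError.
def Pre_stringify_points (points : List (Int × Int)) (fill : String) (empty : String) : Prop :=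
  points ≠ []
instance (points : List (Int × Int)) (fill : String) (empty : String) : Decidable (Pre_stringify_points points fill empty) := by unfold Pre_stringify_points; infer_instance

def pvWitness_stringify_points : (List (Int × Int)) × String × String :=
  ([(0, 0), (2, 1)], "#", ".")

def Spec_stringify_points (points : List (Int × Int)) (fill : String) (empty : String) (out : String) : Prop := out = stringify_points_alt points fill empty
instance (points : List (Int × Int)) (fill : String) (empty : String) (out : String) : Decidable (Spec_stringify_points points fill empty out) := by unfold Spec_stringify_points; infer_instance

-- ===== CLAIM (what is proved, stated in full; the proofs are below) =====
def Claim_equal_stringify_points : Prop := ∀ (points : List (Int × Int)) (fill : String) (empty : String), Dom_stringify_points points fill empty → Pre_stringify_points points fill empty → Spec_stringify_points points fill empty (stringify_points points fill empty)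

-- ===== LEMMAS AND PROOFS =====

-- abbreviation for the scatter step of B
def pvStep (xmin ymin : Int) (fill : String) (g : List (List String)) (p : Int × Int) : List (List String) :=
  g.set (p.2 - ymin).toNat ((g.getD (p.2 - ymin).toNat []).set (p.1 - xmin).toNat fill)

lemma pvCell (xmin xmax ymin ymax : Int) (fill : String)
    (pts : List (Int × Int))
    (hb : ∀ p ∈ pts, xmin ≤ p.1 ∧ p.1 ≤ xmax ∧ ymin ≤ p.2 ∧ p.2 ≤ ymax) :
    ∀ (g : List (List String)),
    g.length = (ymax - ymin + 1).toNat →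
    (∀ row ∈ g, row.length = (xmax - xmin + 1).toNat) →
    ∀ r c : Nat, r < (ymax - ymin + 1).toNat → c < (xmax - xmin + 1).toNat →
    (((pts.foldl (pvStep xmin ymin fill) g).getD r []).getD c "" =
      if ((xmin + c : Int), (ymin + r : Int)) ∈ pts then fill else (g.getD r []).getD c "")
    ∧ (pts.foldl (pvStep xmin ymin fill) g).length = g.length
    ∧ (∀ row ∈ pts.foldl (pvStep xmin ymin fill) g, row.length = (xmax - xmin + 1).toNat) := by
  induction pts with
  | nil => intro g hlen hrows r c hr hc; exact ⟨by simp, rfl, hrows⟩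
  | cons p t ih =>
    intro g hlen hrows r c hr hc
    obtain ⟨hbx1, hbx2, hby1, hby2⟩ := hb p (by simp)
    have hbt : ∀ q ∈ t, xmin ≤ q.1 ∧ q.1 ≤ xmax ∧ ymin ≤ q.2 ∧ q.2 ≤ ymax := by
      intro q hq; exact hb q (by simp [hq])
    have hR : (p.2 - ymin).toNat < g.length := by rw [hlen]; omega
    have hrowR : (g.getD (p.2 - ymin).toNat []).length = (xmax - xmin + 1).toNat := by
      rw [List.getD_eq_getElem _ _ hR]; exact hrows _ (List.getElem_mem hR)
    have hlen' : (pvStep xmin ymin fill g p).length = (ymax - ymin + 1).toNat := by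
      simp [pvStep, hlen]
    have hrows' : ∀ row ∈ pvStep xmin ymin fill g p, row.length = (xmax - xmin + 1).toNat := by
      intro row hrow
      rcases List.mem_or_eq_of_mem_set hrow with h | h
      · exact hrows _ h
      · subst h; rw [List.length_set]; exact hrowR
    have ihg := ih hbt (pvStep xmin ymin fill g p) hlen' hrows' r c hr hc
    refine ⟨?_, ?_, ?_⟩
    · rw [List.foldl_cons, ihg.1]
      have hstepcell : ((pvStep xmin ymin fill g p).getD r []).getD c "" =
          if p = ((xmin + c : Int), (ymin + r : Int)) then fill else (g.getD r []).getD c "" := by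
        have hrlen : r < (pvStep xmin ymin fill g p).length := by rw [hlen']; exact hr
        rw [List.getD_eq_getElem _ _ hrlen]
        simp only [pvStep, List.getElem_set]
        by_cases hRr : (p.2 - ymin).toNat = r
        · rw [if_pos hRr]
          have hy : p.2 = ymin + r := by omega
          have hc2 : c < ((g.getD (p.2 - ymin).toNat []).set (p.1 - xmin).toNat fill).length := by
            rw [List.length_set, hrowR]; exact hc
          rw [List.getD_eq_getElem _ _ hc2, List.getElem_set]
          by_cases hCc : (p.1 - xmin).toNat = c
          · have hx : p.1 = xmin + c := by omega
            have hp : p = ((xmin + c : Int), (ymin + r : Int)) := by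
              obtain ⟨a, b⟩ := p; simp only [Prod.mk.injEq]; exact ⟨hx, hy⟩
            rw [if_pos hCc, if_pos hp]
          · have hp : ¬ p = ((xmin + c : Int), (ymin + r : Int)) := by
              intro h; apply hCc; rw [h]; show ((xmin + (c : Int)) - xmin).toNat = c; omega
            rw [if_neg hCc, if_neg hp, ← hRr]
            exact (List.getD_eq_getElem _ _ (by rw [hrowR]; exact hc)).symm
        · rw [if_neg hRr]
          have hp : ¬ p = ((xmin + c : Int), (ymin + r : Int)) := by
            intro h; apply hRr; rw [h]; show ((ymin + (r : Int)) - ymin).toNat = r; omega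
          rw [if_neg hp, List.getD_eq_getElem _ _ (by omega : r < g.length)]
      rw [hstepcell]
      by_cases hmem : ((xmin + c : Int), (ymin + r : Int)) ∈ t
      · simp [hmem]
      · by_cases hp : p = ((xmin + c : Int), (ymin + r : Int))
        · simp [hmem, hp]
        · have hp' : ((xmin + c : Int), (ymin + r : Int)) ≠ p := fun h => hp h.symm
          simp [hmem, hp, hp']
    · rw [List.foldl_cons, ihg.2.1]; simp [pvStep]
    · rw [List.foldl_cons]; exact ihg.2.2

lemma pvMin_fst (points : List (Int × Int)) (key : (Int × Int) → Int) (m : Int × Int)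
    (h : PySem.List.min? points key = some m) :
    PySem.List.min? (points.map key) (fun v => v) = some (key m) := by
  have hmem := PySem.List.min?_mem h
  have hmin := PySem.List.min?_isMin h
  rcases hv : PySem.List.min? (points.map key) (fun v => v) with _ | v
  · rw [PySem.List.min?_eq_none_iff, List.map_eq_nil_iff] at hv
    subst hv; simp at hmem
  · have hvmin := PySem.List.min?_isMin hv
    obtain ⟨q, hq, rfl⟩ := List.mem_map.mp (PySem.List.min?_mem hv)
    exact congrArg some (le_antisymm (hvmin (key m) (List.mem_map_of_mem hmem)) (hmin q hq))

lemma pvMax_fst (points : List (Int × Int)) (key : (Int × Int) → Int) (m : Int × Int)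
    (h : PySem.List.max? points key = some m) :
    PySem.List.max? (points.map key) (fun v => v) = some (key m) := by
  have hmem := PySem.List.max?_mem h
  have hmax := PySem.List.max?_isMax h
  rcases hv : PySem.List.max? (points.map key) (fun v => v) with _ | v
  · rw [PySem.List.max?_eq_none_iff, List.map_eq_nil_iff] at hv
    subst hv; simp at hmem
  · have hvmax := PySem.List.max?_isMax hv
    obtain ⟨q, hq, rfl⟩ := List.mem_map.mp (PySem.List.max?_mem hv)
    exact congrArg some (le_antisymm (hmax q hq) (hvmax (key m) (List.mem_map_of_mem hmem)))
theorem pvMain (points : List (Int × Int)) (fill empty : String) (hpre : points ≠ []) :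
    stringify_points points fill empty = stringify_points_alt points fill empty := by
  rcases hmx : PySem.List.min? points (fun p => p.1) with _ | mx
  · rw [PySem.List.min?_eq_none_iff] at hmx; exact absurd hmx hpre
  rcases hMx : PySem.List.max? points (fun p => p.1) with _ | Mx
  · rw [PySem.List.max?_eq_none_iff] at hMx; exact absurd hMx hpre
  rcases hmy : PySem.List.min? points (fun p => p.2) with _ | my
  · rw [PySem.List.min?_eq_none_iff] at hmy; exact absurd hmy hpre
  rcases hMy : PySem.List.max? points (fun p => p.2) with _ | My
  · rw [PySem.List.max?_eq_none_iff] at hMy; exact absurd hMy hpre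
  have hmx' := pvMin_fst points (fun p => p.1) mx hmx
  have hMx' := pvMax_fst points (fun p => p.1) Mx hMx
  have hmy' := pvMin_fst points (fun p => p.2) my hmy
  have hMy' := pvMax_fst points (fun p => p.2) My hMy
  have hb : ∀ p ∈ points, mx.1 ≤ p.1 ∧ p.1 ≤ Mx.1 ∧ my.2 ≤ p.2 ∧ p.2 ≤ My.2 := by
    intro p hp
    exact ⟨PySem.List.min?_isMin hmx p hp, PySem.List.max?_isMax hMx p hp,
           PySem.List.min?_isMin hmy p hp, PySem.List.max?_isMax hMy p hp⟩
  simp only [stringify_points, stringify_points_alt, hmx, hMx, hmy, hMy, hmx', hMx', hmy', hMy']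
  set w := (Mx.1 - mx.1 + 1).toNat with hw
  set h := (My.2 - my.2 + 1).toNat with hh
  have hcell := pvCell mx.1 Mx.1 my.2 My.2 fill points hb
      (List.replicate h (List.replicate w empty)) (by rw [List.length_replicate]) (by intro row hrow; rw [List.eq_of_mem_replicate hrow, List.length_replicate])
  have hmxm := PySem.List.min?_mem hmx
  have hwpos : 0 < w := by
    obtain ⟨h1, h2, h3, h4⟩ := hb mx hmxm
    rw [hw]; omega
  have hhpos : 0 < h := by
    obtain ⟨h1, h2, h3, h4⟩ := hb my (PySem.List.min?_mem hmy)
    rw [hh]; omega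
  rw [show (fun (g : List (List String)) (p : Int × Int) =>
        g.set (p.2 - my.2).toNat ((g.getD (p.2 - my.2).toNat []).set (p.1 - mx.1).toNat fill))
      = pvStep mx.1 my.2 fill from rfl]
  have hlenf := (hcell 0 0 hhpos hwpos).2.1
  have hrowsf := (hcell 0 0 hhpos hwpos).2.2
  rw [List.length_replicate] at hlenf
  congr 1
  apply List.ext_getElem
  · rw [List.length_map, List.length_map, PySem.List.length_pyRange_one, hlenf]
    omega
  · intro i h1 h2
    rw [List.length_map, PySem.List.length_pyRange_one] at h1
    have hi : i < h := by omega
    rw [List.getElem_map, List.getElem_map, PySem.List.getElem_pyRange_one]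
    congr 1
    have h2' : i < (List.foldl (pvStep mx.1 my.2 fill)
        (List.replicate h (List.replicate w empty)) points).length := by rw [hlenf]; exact hi
    apply List.ext_getElem
    · rw [List.length_map, PySem.List.length_pyRange_one]
      rw [hrowsf _ (List.getElem_mem h2')]
      omega
    · intro j hj1 hj2
      rw [List.length_map, PySem.List.length_pyRange_one] at hj1
      have hjw : j < w := by omega
      rw [List.getElem_map, PySem.List.getElem_pyRange_one]
      have hc1 := (hcell i j hi hjw).1
      rw [List.getD_eq_getElem _ _ h2', List.getD_eq_getElem _ _ (by rw [hrowsf _ (List.getElem_mem h2')]; exact hjw)] at hc1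
      have hrep : ((List.replicate h (List.replicate w empty)).getD i []).getD j "" = empty := by
        rw [List.getD_eq_getElem (List.replicate h (List.replicate w empty)) []
              (by rw [List.length_replicate]; exact hi), List.getElem_replicate]
        rw [List.getD_eq_getElem _ _ (by rw [List.length_replicate]; exact hjw), List.getElem_replicate]
      rw [hc1, hrep]

-- ===== VERDICT (by name: the statement is the Claim_ definition above) =====
theorem stringify_points_spec : Claim_equal_stringify_points := by
  intro points fill empty _ hpre
  show stringify_points points fill empty = stringify_points_alt points fill empty
  exact pvMain points fill empty hpre
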